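-- pv_equiv track=rewrite | github.com/holland-backup/holland | plugins/holland.backup.maatkit/holland/backup/maatkit.py | make_compat_args
-- ===== SOURCE A (Python) =====
-- NEW_OPTIONS_MAP = {
--     'basedir' : 'base-dir',
--     'flushlock' : 'flush-lock',
--     'locktables' : 'lock-tables',
--     'biggestfirst' : 'biggest-first',
--     'binlogpos' : 'bin-log-position',
--     'chunksize' : 'chunk-size',
--     'dbregex' : 'databases-regex',
--     'ignoredb' : 'ignore-databases',
--     'ignoreengine' : 'ignore-engines',
--     'tblregex' : 'tables-regex',
--     'ignoretbl' : 'ignore-tables',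
--     'numthread' : 'threads',
--     'stopslave' : 'stop-slave',
--     'flushlog' : 'flush-log',
--     'setperdb' : 'set-per-database',
--     'test' : 'dry-run',
-- }
--
-- def make_compat_args(args):
--     result = []
--     for arg in args:
--         if arg.startswith('--'):
--             negate = False
--             check_arg = arg[2:] # strip '--'
--             if check_arg.startswith('no'):
--                 check_arg = check_arg[2:] # looking for --no<option>
--                 negate = True
--             if check_arg in NEW_OPTIONS_MAP:
--                 arg = '--%s%s' % (['','no'][negate], NEW_OPTIONS_MAP[check_arg])
--         result.append(arg)
--     return result
-- ===== SOURCE B (Python) =====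
-- NEW_OPTIONS_MAP = {
--     'basedir' : 'base-dir',
--     'flushlock' : 'flush-lock',
--     'locktables' : 'lock-tables',
--     'biggestfirst' : 'biggest-first',
--     'binlogpos' : 'bin-log-position',
--     'chunksize' : 'chunk-size',
--     'dbregex' : 'databases-regex',
--     'ignoredb' : 'ignore-databases',
--     'ignoreengine' : 'ignore-engines',
--     'tblregex' : 'tables-regex',
--     'ignoretbl' : 'ignore-tables',
--     'numthread' : 'threads',
--     'stopslave' : 'stop-slave',
--     'flushlog' : 'flush-log',
--     'setperdb' : 'set-per-database',
--     'test' : 'dry-run',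
-- }
--
-- # Flat translation table built once at module load: both the plain and the
-- # negated spelling of every old flag map directly to the new spelling.
-- TRANSLATION = {}
-- for _key, _val in NEW_OPTIONS_MAP.items():
--     TRANSLATION['--' + _key] = '--' + _val
--     TRANSLATION['--no' + _key] = '--no' + _val
--
-- def make_compat_args(args):
--     return [TRANSLATION.get(arg, arg) for arg in args]
-- ===== Notes on version B (the rewrite author's own statement) =====
-- stated objective: idiomatic
-- what changed: Replaces A's per-argument prefix stripping and negate logic by a flat 32-entry translation dict built once at module load (both '--key' and '--nokey' spellings), so the body is a single dict lookup per argument.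
import Mathlib
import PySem

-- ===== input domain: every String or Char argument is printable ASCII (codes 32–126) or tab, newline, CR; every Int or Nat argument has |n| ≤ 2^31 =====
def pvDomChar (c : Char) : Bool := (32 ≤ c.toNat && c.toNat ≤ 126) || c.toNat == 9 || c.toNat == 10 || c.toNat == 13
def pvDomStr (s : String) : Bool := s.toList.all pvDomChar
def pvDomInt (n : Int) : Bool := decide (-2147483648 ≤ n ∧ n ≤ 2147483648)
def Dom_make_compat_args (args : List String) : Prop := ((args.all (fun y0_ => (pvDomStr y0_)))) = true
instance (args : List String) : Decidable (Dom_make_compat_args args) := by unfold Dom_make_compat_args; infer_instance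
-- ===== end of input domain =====

-- B replaces A's per-argument prefix parsing by one flat 32-entry translation table
-- built once from NEW_OPTIONS_MAP and a single lookup per argument (objective: idiomatic).

def NEW_OPTIONS_MAP : PySem.Dict String String := PySem.Dict.ofList
  [("basedir", "base-dir"), ("flushlock", "flush-lock"), ("locktables", "lock-tables"),
   ("biggestfirst", "biggest-first"), ("binlogpos", "bin-log-position"), ("chunksize", "chunk-size"),
   ("dbregex", "databases-regex"), ("ignoredb", "ignore-databases"), ("ignoreengine", "ignore-engines"),
   ("tblregex", "tables-regex"), ("ignoretbl", "ignore-tables"), ("numthread", "threads"),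
   ("stopslave", "stop-slave"), ("flushlog", "flush-log"), ("setperdb", "set-per-database"),
   ("test", "dry-run")]

-- ===== PORT A =====
def make_compat_args (args : List String) : List String :=
  args.foldl (fun result arg =>
    let arg :=
      if PySem.Str.startswith arg "--" then
        let negate := false
        let check_arg := PySem.Str.slice arg (some 2) none     -- arg[2:]
        let (check_arg, negate) :=
          if PySem.Str.startswith check_arg "no" then
            (PySem.Str.slice check_arg (some 2) none, true)    -- check_arg[2:]
          else (check_arg, negate)
        if NEW_OPTIONS_MAP.contains check_arg then
          -- '--%s%s' % (['','no'][negate], NEW_OPTIONS_MAP[check_arg])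
          PySem.Str.join "" ["--", PySem.List.pyGetD ["", "no"] (if negate then 1 else 0) "",
                             NEW_OPTIONS_MAP.getD check_arg ""]
        else arg
      else arg
    result ++ [arg]) []

-- ===== PORT B =====
-- TRANSLATION = {} ; for key, val in NEW_OPTIONS_MAP.items(): TRANSLATION['--'+key] = '--'+val ; TRANSLATION['--no'+key] = '--no'+val
def TRANSLATION : PySem.Dict String String :=
  NEW_OPTIONS_MAP.items.foldl (fun t p =>
    (t.insert (PySem.Str.join "" ["--", p.1]) (PySem.Str.join "" ["--", p.2])).insert
      (PySem.Str.join "" ["--no", p.1]) (PySem.Str.join "" ["--no", p.2]))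
    PySem.Dict.empty

def make_compat_args_alt (args : List String) : List String :=
  args.map (fun arg => (TRANSLATION.get? arg).getD arg)

-- ===== PRECONDITION & SPEC =====
def Spec_make_compat_args (args : List String) (out : List String) : Prop := out = make_compat_args_alt args
instance (args : List String) (out : List String) : Decidable (Spec_make_compat_args args out) := by unfold Spec_make_compat_args; infer_instance

-- ===== CLAIM (what is proved, stated in full; the proofs are below) =====
def Claim_equal_make_compat_args : Prop := ∀ (args : List String), Dom_make_compat_args args → Spec_make_compat_args args (make_compat_args args)

-- ===== LEMMAS AND PROOFS =====

-- the 32 argument strings TRANSLATION translates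
def pvKlist : List String :=
  ["--basedir", "--nobasedir", "--flushlock", "--noflushlock", "--locktables", "--nolocktables",
   "--biggestfirst", "--nobiggestfirst", "--binlogpos", "--nobinlogpos", "--chunksize", "--nochunksize",
   "--dbregex", "--nodbregex", "--ignoredb", "--noignoredb", "--ignoreengine", "--noignoreengine",
   "--tblregex", "--notblregex", "--ignoretbl", "--noignoretbl", "--numthread", "--nonumthread",
   "--stopslave", "--nostopslave", "--flushlog", "--noflushlog", "--setperdb", "--nosetperdb",
   "--test", "--notest"]

set_option maxRecDepth 8000 in
theorem pvKeys_TRANSLATION : TRANSLATION.keys = pvKlist := by decide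

set_option maxRecDepth 8000 in
theorem pvKeys_MAP : NEW_OPTIONS_MAP.keys =
    ["basedir", "flushlock", "locktables", "biggestfirst", "binlogpos", "chunksize",
     "dbregex", "ignoredb", "ignoreengine", "tblregex", "ignoretbl", "numthread",
     "stopslave", "flushlog", "setperdb", "test"] := by decide

theorem pvSlice2 (l : List Char) : PySem.List.slice l (some 2) none = l.drop 2 := by
  rw [show (2:Int) = ((2:Nat):Int) by norm_num, PySem.List.slice_from_natCast]

theorem pvSlice2_toList (s : String) :
    (PySem.Str.slice s (some 2) none).toList = s.toList.drop 2 := by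
  simp [PySem.Str.slice]
  rw [show (2:Int) = ((2:Nat):Int) by norm_num, PySem.List.slice_from_natCast]

-- any string of the shape "--<key>" or "--no<key>" with key in NEW_OPTIONS_MAP lies in pvKlist
set_option maxRecDepth 8000 in
theorem pvMem_Klist (c : String) (hc : c ∈ NEW_OPTIONS_MAP.keys)
    (pre : List Char) (hpre : pre ∈ [['-','-'], ['-','-','n','o']])
    (arg : String) (ha : arg.toList = pre ++ c.toList) : arg ∈ pvKlist := by
  have h2 : arg = String.ofList (pre ++ c.toList) := by rw [← ha, String.ofList_toList]
  rw [h2, pvKeys_MAP] at *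
  fin_cases hpre <;> fin_cases hc <;> decide

-- the per-argument step of A equals B's table lookup
set_option maxRecDepth 8000 in
set_option maxHeartbeats 2000000 in
theorem pvStep_eq (arg : String) :
    (if PySem.Str.startswith arg "--" then
        let negate := false
        let check_arg := PySem.Str.slice arg (some 2) none
        let (check_arg, negate) :=
          if PySem.Str.startswith check_arg "no" then
            (PySem.Str.slice check_arg (some 2) none, true)
          else (check_arg, negate)
        if NEW_OPTIONS_MAP.contains check_arg then
          PySem.Str.join "" ["--", PySem.List.pyGetD ["", "no"] (if negate then 1 else 0) "",
                             NEW_OPTIONS_MAP.getD check_arg ""]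
        else arg
      else arg) = (TRANSLATION.get? arg).getD arg := by
  by_cases hK : arg ∈ pvKlist
  · fin_cases hK <;> decide
  · have hnone : TRANSLATION.get? arg = none :=
      (PySem.Dict.get?_eq_none_iff_not_mem_keys _ _).mpr (by rw [pvKeys_TRANSLATION]; exact hK)
    rw [hnone, Option.getD_none]
    by_cases h1 : PySem.Str.startswith arg "--"
    · rw [if_pos h1]
      obtain ⟨t, ht⟩ := (PySem.Chars.startswith_iff _ _).mp (by simpa using h1)
      by_cases h2 : PySem.Str.startswith (PySem.Str.slice arg (some 2) none) "no"
      · simp only [h2, if_true]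
        by_cases h3 : NEW_OPTIONS_MAP.contains
            (PySem.Str.slice (PySem.Str.slice arg (some 2) none) (some 2) none)
        · -- '--no<key>': then arg ∈ pvKlist, contradicting hK
          refine absurd (pvMem_Klist _ ((PySem.Dict.contains_iff_mem_keys _ _).mp h3)
            ['-','-','n','o'] (by simp) arg ?_) hK
          obtain ⟨u, hu⟩ := (PySem.Chars.startswith_iff _ _).mp (by simpa using h2)
          rw [pvSlice2, ← ht] at hu
          simp at hu
          rw [pvSlice2_toList (PySem.Str.slice arg (some 2) none), pvSlice2_toList arg,
              ← ht, ← hu]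
          simp
        · simp [h3]
      · simp only [h2, if_false, Bool.false_eq_true]
        by_cases h4 : NEW_OPTIONS_MAP.contains (PySem.Str.slice arg (some 2) none)
        · -- '--<key>': then arg ∈ pvKlist, contradicting hK
          refine absurd (pvMem_Klist _ ((PySem.Dict.contains_iff_mem_keys _ _).mp h4)
            ['-','-'] (by simp) arg ?_) hK
          rw [pvSlice2_toList, ← ht]
          simp
        · simp [h4]
    · rw [if_neg h1]

-- ===== VERDICT (by name: the statement is the Claim_ definition above) =====
set_option maxHeartbeats 2000000 in
theorem make_compat_args_spec : Claim_equal_make_compat_args := by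
  intro args _
  unfold Spec_make_compat_args make_compat_args make_compat_args_alt
  rw [PySem.List.foldl_append_singleton_eq_map]
  simp only [List.nil_append]
  exact List.map_congr_left (fun arg _ => pvStep_eq arg)
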